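-- pv_equiv track=rewrite | github.com/qn06142/coding-python | csphn_lt_clasp.py | count_handshakes
-- ===== SOURCE A (Python) =====
-- def count_handshakes(n, directions):
--     right = 0
--     handshakes = 0
--     for i in range(n):
--         if directions[i] == '>':
--             right += 1
--         elif directions[i] == '<':
--             handshakes += right
--     return handshakes
-- ===== SOURCE B (Python) =====
-- def count_handshakes(n, directions):
--     prefix = [0]
--     for i in range(n):
--         prefix.append(prefix[-1] + (1 if directions[i] == '>' else 0))
--     return sum(prefix[i] for i in range(n) if directions[i] == '<')
-- ===== Notes on version B (the rewrite author's own statement) =====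
-- stated objective: alternative
-- what changed: B replaces A's single-pass running-counter loop by two staged passes over an explicit data structure: it first materialises a prefix-sum array prefix[i] = number of '>' among the first i entries, then sums prefix[i] over the positions of '<'; A keeps no array and accumulates during one scan.
import Mathlib
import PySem

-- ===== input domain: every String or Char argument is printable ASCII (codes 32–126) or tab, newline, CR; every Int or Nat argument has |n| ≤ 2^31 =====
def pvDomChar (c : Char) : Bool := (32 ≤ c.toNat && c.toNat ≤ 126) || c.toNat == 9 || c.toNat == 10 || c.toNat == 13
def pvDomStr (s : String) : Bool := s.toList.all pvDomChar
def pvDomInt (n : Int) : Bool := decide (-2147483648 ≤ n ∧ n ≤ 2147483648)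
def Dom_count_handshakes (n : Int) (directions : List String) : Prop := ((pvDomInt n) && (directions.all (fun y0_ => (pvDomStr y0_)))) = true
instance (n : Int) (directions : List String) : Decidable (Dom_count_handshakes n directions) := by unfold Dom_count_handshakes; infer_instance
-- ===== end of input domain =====

-- B computes the same pair count by two staged passes — an explicit prefix-sum array
-- of '>' counts, then a sum of its entries at the '<' positions (alternative, same cost).


-- ===== PORT A =====
-- single forward scan: running count of '>' so far, credited to each '<'
def count_handshakes (n : Int) (directions : List String) : Int :=
  let st := (PySem.List.pyRange 0 n 1).foldl
    (fun (st : Int × Int) i =>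
      let d := PySem.List.pyGetD directions i ""   -- in range under Pre_
      if d = ">" then (st.1 + 1, st.2)
      else if d = "<" then (st.1, st.2 + st.1)
      else st)
    (0, 0)
  st.2

-- ===== PORT B =====
-- pass 1 builds the prefix-sum array of '>' counts; pass 2 sums its entries at '<' positions
def count_handshakes_alt (n : Int) (directions : List String) : Int :=
  let pfx := (PySem.List.pyRange 0 n 1).foldl
    (fun (p : List Int) i =>
      p ++ [PySem.List.pyGetD p (-1) 0 +
            (if PySem.List.pyGetD directions i "" = ">" then 1 else 0)])   -- in range under Pre_
    [0]
  ((PySem.List.pyRange 0 n 1).filter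
      (fun i => PySem.List.pyGetD directions i "" = "<")).foldl
    (fun acc i => acc + PySem.List.pyGetD pfx i 0) 0

-- ===== PRECONDITION & SPEC =====
-- Python A raises IndexError iff n exceeds the list length (for n ≤ 0 the loop is empty).
def Pre_count_handshakes (n : Int) (directions : List String) : Prop :=
  n ≤ (directions.length : Int)
instance (n : Int) (directions : List String) : Decidable (Pre_count_handshakes n directions) := by unfold Pre_count_handshakes; infer_instance

def pvWitness_count_handshakes : Int × List String := (3, [">", "<", "<"])

def Spec_count_handshakes (n : Int) (directions : List String) (out : Int) : Prop := out = count_handshakes_alt n directions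
instance (n : Int) (directions : List String) (out : Int) : Decidable (Spec_count_handshakes n directions out) := by unfold Spec_count_handshakes; infer_instance

-- ===== CLAIM (what is proved, stated in full; the proofs are below) =====
def Claim_equal_count_handshakes : Prop := ∀ (n : Int) (directions : List String), Dom_count_handshakes n directions → Pre_count_handshakes n directions → Spec_count_handshakes n directions (count_handshakes n directions)

-- ===== LEMMAS AND PROOFS =====

-- the '>'-counter update shared by both characterisations
def pvStep (c : Int) (d : String) : Int := c + (if d = ">" then 1 else 0)

-- reference value: scan ys with counter c, crediting the counter to each '<'
def pvSum : List String → Int → Int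
  | [], _ => 0
  | d :: ys, c => (if d = "<" then c else 0) + pvSum ys (pvStep c d)

-- A's loop invariant
theorem pvA_inv (ys : List String) (r h : Int) :
    (ys.foldl (fun (st : Int × Int) d =>
        if d = ">" then (st.1 + 1, st.2)
        else if d = "<" then (st.1, st.2 + st.1)
        else st) (r, h)).2 = h + pvSum ys r := by
  induction ys generalizing r h with
  | nil => simp [pvSum]
  | cons x ys ih =>
    by_cases hx : x = ">"
    · simp [List.foldl_cons, hx, ih, pvSum, pvStep]
    · by_cases hx' : x = "<"
      · simp [List.foldl_cons, hx', ih, pvSum, pvStep]; ring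
      · simp [List.foldl_cons, hx, hx', ih, pvSum, pvStep]

-- B's first pass builds exactly the scanl of pvStep
theorem pvB_build (ys : List String) (q : List Int) (c : Int) :
    ys.foldl (fun (p : List Int) d =>
        p ++ [PySem.List.pyGetD p (-1) 0 + (if d = ">" then 1 else 0)])
      (q ++ [c]) = q ++ List.scanl pvStep c ys := by
  induction ys generalizing q c with
  | nil => simp [List.scanl]
  | cons d ys ih =>
    simp only [List.foldl_cons, PySem.List.pyGetD_neg_one_append_singleton, List.scanl_cons]
    have h := ih (q ++ [c]) (pvStep c d)
    simpa [pvStep, List.append_assoc] using h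

-- B's second pass over the scanl equals the reference scan
theorem pvB_sum (ys : List String) (c : Int) :
    ((List.range ys.length).map (fun k =>
        if ys.getD k "" = "<" then (List.scanl pvStep c ys).getD k 0 else 0)).sum
      = pvSum ys c := by
  induction ys generalizing c with
  | nil => simp [pvSum]
  | cons d ys ih =>
    rw [List.length_cons, List.range_succ_eq_map, List.map_cons, List.map_map,
      List.sum_cons, List.scanl_cons]
    simp only [Function.comp_def, List.getD_cons_succ, List.getD_cons_zero]
    rw [ih (pvStep c d)]
    simp [pvSum]

-- sum over a filtered list = sum of if-guarded terms
theorem pvSum_filter (l : List Nat) (p : Nat → Bool) (f : Nat → Int) :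
    ((l.filter p).map f).sum = (l.map (fun k => if p k then f k else 0)).sum := by
  induction l with
  | nil => rfl
  | cons a l ih => by_cases h : p a <;> simp [h, ih]

-- ===== VERDICT (by name: the statement is the Claim_ definition above) =====
theorem count_handshakes_spec : Claim_equal_count_handshakes := by
  intro n directions _ hpre
  unfold Spec_count_handshakes count_handshakes count_handshakes_alt
  rw [PySem.List.pyRange_one]
  simp only [Int.sub_zero, zero_add]
  set m := n.toNat with hm
  set ys : List String := (List.range m).map (fun k => directions.getD k "") with hys
  -- A's fold over indices is the fold over the element list ys
  have hA : ((List.range m).map (fun k : Nat => (k : Int))).foldl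
      (fun (st : Int × Int) i =>
        if PySem.List.pyGetD directions i "" = ">" then (st.1 + 1, st.2)
        else if PySem.List.pyGetD directions i "" = "<" then (st.1, st.2 + st.1)
        else st) (0, 0)
      = ys.foldl (fun (st : Int × Int) d =>
          if d = ">" then (st.1 + 1, st.2)
          else if d = "<" then (st.1, st.2 + st.1)
          else st) (0, 0) := by
    rw [hys, List.foldl_map, List.foldl_map]
    simp only [PySem.List.pyGetD_natCast]
  -- B's first pass builds the scanl of pvStep over ys
  have hP : ((List.range m).map (fun k : Nat => (k : Int))).foldl
      (fun (p : List Int) i =>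
        p ++ [PySem.List.pyGetD p (-1) 0 +
              (if PySem.List.pyGetD directions i "" = ">" then 1 else 0)]) [0]
      = List.scanl pvStep 0 ys := by
    rw [hys, List.foldl_map]
    simp only [PySem.List.pyGetD_natCast]
    have h := pvB_build ((List.range m).map (fun k => directions.getD k "")) [] 0
    rw [List.foldl_map] at h
    simpa using h
  rw [hA, pvA_inv, hP]
  -- B's second pass
  rw [List.filter_map, List.foldl_map, PySem.List.foldl_add, pvSum_filter]
  simp only [PySem.List.pyGetD_natCast, Function.comp_def, zero_add, decide_eq_true_eq]
  -- replace directions.getD by ys.getD under the range, then close with pvB_sum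
  have hc : (List.range m).map
        (fun k => if directions.getD k "" = "<" then (List.scanl pvStep 0 ys).getD k 0 else 0)
      = (List.range ys.length).map
        (fun k => if ys.getD k "" = "<" then (List.scanl pvStep 0 ys).getD k 0 else 0) := by
    rw [hys, List.length_map, List.length_range]
    refine List.map_congr_left ?_
    intro k hk
    rw [← hys, PySem.List.getD_map_range _ _ _ _ (List.mem_range.mp hk)]
  rw [hc, pvB_sum]
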